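-- pv_equiv track=rewrite | github.com/vic02505/tda_anual_TP | part_II/dynamic_coins_game.py | get_gains_matrix
-- ===== SOURCE A (Python) =====
-- def best_next_coin(i, j, gains_matrix, coins_list):
--     if i+1 >j:
--         return 0
--     elif coins_list[i] >= coins_list[j]:
--         return gains_matrix[i+1][j]
--     else:
--         return gains_matrix[i][j-1]
--
-- def get_gains_matrix(coins_list):
--
--     coins_list_len = len(coins_list)
--
--     gains_matrix = [[0 for _ in range(coins_list_len)] for _ in range(coins_list_len)]
--
--     for i in range(coins_list_len-1, 0, -1):
--
--         for j in range(0, coins_list_len):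
--
--             if  i > j:
--                 gains_matrix[i][j] = 0
--             else:
--                 gains_matrix[i][j] = max(coins_list[i] + best_next_coin(i+1, j, gains_matrix, coins_list),
--                                  coins_list[j] + best_next_coin(i, j-1, gains_matrix, coins_list))
--
--     # Esto se puede poner más lindo. El tema es que la iteración anterior llega hasta "i" igual a uno porque
--     # el cero del primer for (el que itera i) es excluyente. Por eso se hace este for aparte
--     for j in range(0, coins_list_len):
--         i = 0
--         gains_matrix[i][j] = max(coins_list[i] + best_next_coin(i + 1, j, gains_matrix, coins_list),
--                             coins_list[j] + best_next_coin(i, j - 1, gains_matrix, coins_list))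
--
--     return gains_matrix
-- ===== SOURCE B (Python) =====
-- def get_gains_matrix(coins_list):
--     n = len(coins_list)
--     memo = {}
--
--     def opp(a, b):
--         # greedy opponent: takes the larger visible coin, we get the rest
--         if a + 1 > b:
--             return 0
--         if coins_list[a] >= coins_list[b]:
--             return gain(a + 1, b)
--         return gain(a, b - 1)
--
--     def gain(i, j):
--         if i > j:
--             return 0
--         if (i, j) not in memo:
--             best = max(coins_list[i] + opp(i + 1, j),
--                        coins_list[j] + opp(i, j - 1))
--             memo[(i, j)] = best
--         return memo[(i, j)]
--
--     rows = []
--     for i in range(n - 1, -1, -1):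
--         rows.append([gain(i, j) for j in range(n)])
--     rows.reverse()
--     return rows
-- ===== Notes on version B (the rewrite author's own statement) =====
-- stated objective: alternative
-- what changed: A fills a preallocated n-by-n matrix bottom-up by destructive row-by-row assignment with a separate duplicated loop for row 0; B instead defines the game value as a top-down memoized recursion gain(i,j)/opp(a,b) over intervals with a dictionary memo, and materialises the matrix by calling gain on every cell.
import Mathlib
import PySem

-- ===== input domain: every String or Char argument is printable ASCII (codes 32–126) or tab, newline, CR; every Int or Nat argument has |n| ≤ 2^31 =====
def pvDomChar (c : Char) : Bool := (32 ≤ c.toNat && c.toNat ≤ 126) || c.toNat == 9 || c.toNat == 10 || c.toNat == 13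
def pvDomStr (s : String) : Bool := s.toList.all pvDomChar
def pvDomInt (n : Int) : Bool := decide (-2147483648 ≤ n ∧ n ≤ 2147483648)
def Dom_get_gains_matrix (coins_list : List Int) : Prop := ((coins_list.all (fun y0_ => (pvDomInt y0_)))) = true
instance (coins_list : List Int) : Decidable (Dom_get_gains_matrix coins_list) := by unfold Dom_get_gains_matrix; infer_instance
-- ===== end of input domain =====

-- B replaces A's bottom-up destructive matrix fill (with its duplicated row-0 loop) by a
-- top-down memoized recursion over intervals; equivalence of the returned matrices is
-- proved for every input (both are total).

-- ===== PORT A =====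
-- xs[i]: exact wherever A executes it (every index A reads is in range, so the default 0 is never the result)
def cGet (xs : List Int) (i : Int) : Int := PySem.List.pyGetD xs i 0
-- m[i][j] for a matrix
def mGet (m : List (List Int)) (i j : Int) : Int := cGet (PySem.List.pyGetD m i []) j
-- m[i][j] = v: exact wherever A executes it (A only assigns at nonnegative in-range indices)
def setCell (m : List (List Int)) (i j : Int) (v : Int) : List (List Int) :=
  m.set i.toNat ((m.getD i.toNat []).set j.toNat v)

def best_next_coin (i j : Int) (gains_matrix : List (List Int)) (coins_list : List Int) : Int :=
  if i + 1 > j then 0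
  else if cGet coins_list i ≥ cGet coins_list j then mGet gains_matrix (i+1) j
  else mGet gains_matrix i (j-1)

-- the body of A's inner loop over j (for a fixed i)
def a_inner (coins_list : List Int) (i : Int) (gm : List (List Int)) (j : Int) : List (List Int) :=
  if i > j then setCell gm i j 0
  else setCell gm i j (max (cGet coins_list i + best_next_coin (i+1) j gm coins_list)
                           (cGet coins_list j + best_next_coin i (j-1) gm coins_list))

def get_gains_matrix (coins_list : List Int) : List (List Int) :=
  let coins_list_len : Int := PySem.List.len coins_list
  let gm0 : List (List Int) :=
    List.replicate coins_list_len.toNat (List.replicate coins_list_len.toNat (0:Int))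
  let gm1 := (PySem.List.pyRange (coins_list_len - 1) 0 (-1)).foldl
    (fun gm i => (PySem.List.pyRange 0 coins_list_len 1).foldl (a_inner coins_list i) gm) gm0
  -- the separate loop for i = 0 (transliterated with i fixed to 0)
  (PySem.List.pyRange 0 coins_list_len 1).foldl
    (fun gm j =>
      setCell gm 0 j (max (cGet coins_list 0 + best_next_coin (0+1) j gm coins_list)
                          (cGet coins_list j + best_next_coin 0 (j-1) gm coins_list))) gm1

-- ===== PORT B =====
-- gain(i, j) / opp(a, b): top-down memoized recursion, memo threaded through the state
mutual
def gainB (coins_list : List Int) (i j : Int)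
    (memo : PySem.Dict (Int × Int) Int) : Int × PySem.Dict (Int × Int) Int :=
  if _h : i > j then (0, memo)
  else
    match memo.get? (i, j) with
    | some v => (v, memo)           -- '(i, j) in memo': return memo[(i, j)]
    | none =>
      let p1 := oppB coins_list (i + 1) j memo
      let p2 := oppB coins_list i (j - 1) p1.2
      let best := max (cGet coins_list i + p1.1) (cGet coins_list j + p2.1)
      (best, p2.2.insert (i, j) best)
  termination_by 2 * (j - i).toNat + 1
  decreasing_by
  · simp only [not_lt] at _h; omega
  · simp only [not_lt] at _h; omega

def oppB (coins_list : List Int) (a b : Int)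
    (memo : PySem.Dict (Int × Int) Int) : Int × PySem.Dict (Int × Int) Int :=
  if _h : a + 1 > b then (0, memo)
  else if cGet coins_list a ≥ cGet coins_list b then gainB coins_list (a + 1) b memo
  else gainB coins_list a (b - 1) memo
  termination_by 2 * (b - a + 1).toNat
  decreasing_by
  · simp only [not_lt] at _h; omega
  · simp only [not_lt] at _h; omega
end

-- row i: [gain(i, j) for j in range(n)], threading the memo left to right
def rowB (coins_list : List Int) (n i : Int)
    (memo : PySem.Dict (Int × Int) Int) : List Int × PySem.Dict (Int × Int) Int :=
  (PySem.List.pyRange 0 n 1).foldl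
    (fun st j => let p := gainB coins_list i j st.2; (st.1 ++ [p.1], p.2)) ([], memo)

def get_gains_matrix_alt (coins_list : List Int) : List (List Int) :=
  let n : Int := PySem.List.len coins_list
  let res := (PySem.List.pyRange (n - 1) (-1) (-1)).foldl
    (fun st i => let p := rowB coins_list n i st.2; (st.1 ++ [p.1], p.2))
    (([] : List (List Int)), (PySem.Dict.mk [] : PySem.Dict (Int × Int) Int))
  res.1.reverse

-- ===== PRECONDITION & SPEC =====
def Spec_get_gains_matrix (coins_list : List Int) (out : List (List Int)) : Prop := out = get_gains_matrix_alt coins_list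
instance (coins_list : List Int) (out : List (List Int)) : Decidable (Spec_get_gains_matrix coins_list out) := by unfold Spec_get_gains_matrix; infer_instance

-- ===== CLAIM (what is proved, stated in full; the proofs are below) =====
def Claim_equal_get_gains_matrix : Prop := ∀ (coins_list : List Int), Dom_get_gains_matrix coins_list → Spec_get_gains_matrix coins_list (get_gains_matrix coins_list)

-- ===== LEMMAS AND PROOFS =====

-- the pure interval recurrence both programs compute
mutual
def Gg (coins : List Int) (i j : Int) : Int :=
  if _h : i > j then 0
  else max (cGet coins i + Go coins (i + 1) j) (cGet coins j + Go coins i (j - 1))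
  termination_by 2 * (j - i).toNat + 1
  decreasing_by
  · simp only [not_lt] at _h; omega
  · simp only [not_lt] at _h; omega

def Go (coins : List Int) (a b : Int) : Int :=
  if _h : a + 1 > b then 0
  else if cGet coins a ≥ cGet coins b then Gg coins (a + 1) b else Gg coins a (b - 1)
  termination_by 2 * (b - a + 1).toNat
  decreasing_by
  · simp only [not_lt] at _h; omega
  · simp only [not_lt] at _h; omega
end

-- row i of the final matrix, and the block of rows i .. n-1
def rowG (coins : List Int) (n i : Int) : List Int :=
  (PySem.List.pyRange 0 n 1).map (fun j => Gg coins i j)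

def rowsTail (coins : List Int) (n i : Int) : List (List Int) :=
  (PySem.List.pyRange i n 1).map (rowG coins n)

-- ---------- unfolding equations for the recurrence ----------

theorem Gg_of_gt (c : List Int) {i j : Int} (h : i > j) : Gg c i j = 0 := by
  rw [Gg, dif_pos h]

theorem Gg_of_le (c : List Int) {i j : Int} (h : ¬ i > j) :
    Gg c i j = max (cGet c i + Go c (i + 1) j) (cGet c j + Go c i (j - 1)) := by
  rw [Gg, dif_neg h]

theorem Go_of_gt (c : List Int) {a b : Int} (h : a + 1 > b) : Go c a b = 0 := by
  rw [Go, dif_pos h]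

theorem Go_of_le (c : List Int) {a b : Int} (h : ¬ a + 1 > b) :
    Go c a b = if cGet c a ≥ cGet c b then Gg c (a + 1) b else Gg c a (b - 1) := by
  rw [Go, dif_neg h]

-- ---------- rows of the final matrix ----------

theorem rowsTail_of_ge (c : List Int) (n i : Int) (h : n ≤ i) : rowsTail c n i = [] := by
  unfold rowsTail
  rw [PySem.List.pyRange_one_eq_nil h]
  rfl

theorem rowsTail_cons (c : List Int) (n i : Int) (h : i < n) :
    rowsTail c n i = rowG c n i :: rowsTail c n (i + 1) := by
  unfold rowsTail
  rw [PySem.List.pyRange_one_cons h]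
  rfl

theorem getElem?_rowsTail (c : List Int) (n i : Int) (k : Nat) (h : i + k < n) :
    (rowsTail c n i)[k]? = some (rowG c n (i + k)) := by
  unfold rowsTail
  rw [List.getElem?_map, PySem.List.getElem?_pyRange_one, if_pos (by omega)]
  rfl

theorem cGet_rowG (c : List Int) (n i k : Int) (h0 : 0 ≤ k) (h1 : k < n) :
    cGet (rowG c n i) k = Gg c i k := by
  unfold cGet rowG
  exact PySem.List.pyGetD_map_pyRange_of_nonneg _ n k 0 h0 h1

-- ---------- A's matrix in mid-flight ----------

def zrow (n : Nat) : List Int := List.replicate n (0:Int)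

-- row i after the inner loop has processed columns 0..m-1 (each processed cell is Gg i j)
def padRow (c : List Int) (i m n : Nat) : List Int :=
  (PySem.List.pyRange 0 (m:Int) 1).map (fun j => Gg c (i:Int) j) ++ List.replicate (n - m) (0:Int)

-- A's whole matrix at that moment: zero rows above, the partial row i, final rows below
def midM (c : List Int) (n i m : Nat) : List (List Int) :=
  List.replicate i (zrow n) ++ padRow c i m n :: rowsTail c (n:Int) ((i:Int) + 1)

theorem padRow_zero (c : List Int) (i n : Nat) : padRow c i 0 n = zrow n := by
  unfold padRow zrow
  simp only [Nat.cast_zero]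
  rw [PySem.List.pyRange_one_eq_nil (le_refl 0)]
  simp

theorem padRow_full (c : List Int) (i n : Nat) : padRow c i n n = rowG c (n:Int) (i:Int) := by
  unfold padRow rowG
  simp

theorem length_padRow_prefix (c : List Int) (i m : Nat) :
    ((PySem.List.pyRange 0 (m:Int) 1).map (fun j => Gg c (i:Int) j)).length = m := by
  simp [PySem.List.length_pyRange_one]

theorem cGet_padRow (c : List Int) (i m n : Nat) (t : Int) (h0 : 0 ≤ t) (h1 : t < m) :
    cGet (padRow c i m n) t = Gg c (i:Int) t := by
  unfold cGet padRow
  rw [PySem.List.pyGetD_of_nonneg _ _ h0, List.getD_eq_getElem?_getD]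
  rw [List.getElem?_append_left (by rw [length_padRow_prefix]; omega)]
  rw [List.getElem?_map, PySem.List.getElem?_pyRange_one, if_pos (by omega)]
  simp only [Option.map_some, Option.getD_some, zero_add]
  rw [show ((t.toNat:Int)) = t by omega]

theorem padRow_set (c : List Int) (i m n : Nat) (hm : m < n) :
    (padRow c i m n).set m (Gg c (i:Int) (m:Int)) = padRow c i (m+1) n := by
  unfold padRow
  rw [List.set_append_right _ _ (Nat.le_of_eq (length_padRow_prefix c i m))]
  rw [length_padRow_prefix, Nat.sub_self]
  rw [show n - m = (n - (m+1)) + 1 from by omega, List.replicate_succ, List.set_cons_zero]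
  have hc : ((m+1:Nat):Int) = (m:Int)+1 := by push_cast; ring
  rw [hc, PySem.List.pyRange_one_succ_right (by omega : (0:Int) ≤ (m:Int)), List.map_append]
  simp

-- helpers for reading/writing the distinguished row of midM
theorem get_mid {α : Type} (pre : List α) (x : α) (rest : List α) (i : Nat)
    (h : pre.length = i) : (pre ++ x :: rest)[i]? = some x := by
  subst h
  rw [List.getElem?_append_right (le_refl _)]
  simp

theorem set_mid {α : Type} (pre : List α) (x v : α) (rest : List α) (i : Nat)
    (h : pre.length = i) : (pre ++ x :: rest).set i v = pre ++ v :: rest := by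
  subst h
  rw [List.set_append_right _ _ (le_refl _)]
  simp

theorem pyGetD_midM_i (c : List Int) (n i m : Nat) :
    PySem.List.pyGetD (midM c n i m) (i:Int) [] = padRow c i m n := by
  unfold midM
  rw [PySem.List.pyGetD_of_nonneg _ _ (by omega : (0:Int) ≤ (i:Int)), List.getD_eq_getElem?_getD,
      Int.toNat_natCast]
  rw [get_mid _ _ _ i (by simp [zrow])]
  rfl

theorem mGet_midM (c : List Int) (n i m : Nat) (r t : Int)
    (hr : (i:Int) < r) (hrn : r < n) (h0 : 0 ≤ t) (htn : t < n) :
    mGet (midM c n i m) r t = Gg c r t := by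
  obtain ⟨k, hk⟩ : ∃ k : Nat, r = (i:Int) + 1 + k := ⟨(r - i - 1).toNat, by omega⟩
  subst hk
  unfold mGet midM
  rw [PySem.List.pyGetD_of_nonneg _ _ (by omega : (0:Int) ≤ (i:Int) + 1 + (k:Int)),
      List.getD_eq_getElem?_getD]
  rw [show ((i:Int) + 1 + (k:Int)).toNat = i + (k + 1) from by omega]
  rw [show (List.replicate i (zrow n) ++ padRow c i m n :: rowsTail c (n:Int) ((i:Int) + 1))[i + (k + 1)]?
        = (padRow c i m n :: rowsTail c (n:Int) ((i:Int) + 1))[k + 1]? from by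
    rw [List.getElem?_append_right (by simp [zrow])]
    simp [zrow]]
  rw [List.getElem?_cons_succ]
  rw [getElem?_rowsTail c (n:Int) ((i:Int)+1) k (by omega)]
  rw [Option.getD_some]
  rw [cGet_rowG c (n:Int) _ t h0 htn]

-- ---------- the per-column step of A's inner loop ----------

theorem bnc1 (c : List Int) (n i m : Nat) (hm : m < n) :
    best_next_coin ((i:Int)+1) (m:Int) (midM c n i m) c = Go c ((i:Int)+1) (m:Int) := by
  by_cases h1 : (i:Int) + 1 + 1 > (m:Int)
  · rw [best_next_coin, if_pos h1, Go_of_gt c h1]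
  · rw [best_next_coin, if_neg h1, Go_of_le c h1]
    by_cases h2 : cGet c ((i:Int)+1) ≥ cGet c (m:Int)
    · rw [if_pos h2, if_pos h2, mGet_midM c n i m _ _ (by omega) (by omega) (by omega) (by omega)]
    · rw [if_neg h2, if_neg h2, mGet_midM c n i m _ _ (by omega) (by omega) (by omega) (by omega)]

theorem bnc2 (c : List Int) (n i m : Nat) (hm : m < n) :
    best_next_coin (i:Int) ((m:Int)-1) (midM c n i m) c = Go c (i:Int) ((m:Int)-1) := by
  by_cases h1 : (i:Int) + 1 > (m:Int) - 1
  · rw [best_next_coin, if_pos h1, Go_of_gt c h1]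
  · rw [best_next_coin, if_neg h1, Go_of_le c h1]
    by_cases h2 : cGet c (i:Int) ≥ cGet c ((m:Int)-1)
    · rw [if_pos h2, if_pos h2, mGet_midM c n i m _ _ (by omega) (by omega) (by omega) (by omega)]
    · rw [if_neg h2, if_neg h2]
      unfold mGet
      rw [pyGetD_midM_i]
      rw [cGet_padRow c i m n _ (by omega) (by omega)]

theorem setCell_midM (c : List Int) (n i m : Nat) (hm : m < n) :
    setCell (midM c n i m) (i:Int) (m:Int) (Gg c (i:Int) (m:Int)) = midM c n i (m+1) := by
  unfold setCell
  rw [Int.toNat_natCast, Int.toNat_natCast]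
  have hget : (midM c n i m).getD i [] = padRow c i m n := by
    rw [List.getD_eq_getElem?_getD]
    unfold midM
    rw [get_mid _ _ _ i (by simp [zrow])]
    rfl
  rw [hget, padRow_set c i m n hm]
  unfold midM
  exact set_mid _ _ _ _ i (by simp [zrow])

theorem a_step (c : List Int) (n i m : Nat) (hm : m < n) :
    a_inner c (i:Int) (midM c n i m) (m:Int) = midM c n i (m+1) := by
  by_cases hij : (i:Int) > (m:Int)
  · rw [a_inner, if_pos hij, show (0:Int) = Gg c (i:Int) (m:Int) from (Gg_of_gt c hij).symm]
    exact setCell_midM c n i m hm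
  · rw [a_inner, if_neg hij, bnc1 c n i m hm, bnc2 c n i m hm]
    rw [show max (cGet c (i:Int) + Go c ((i:Int)+1) (m:Int)) (cGet c (m:Int) + Go c (i:Int) ((m:Int)-1))
          = Gg c (i:Int) (m:Int) from (Gg_of_le c hij).symm]
    exact setCell_midM c n i m hm

-- ---------- A's inner loop ----------

theorem inner_go (c : List Int) (n i : Nat) :
    ∀ k mm : Nat, mm + k = n →
    (PySem.List.pyRange (mm:Int) (n:Int) 1).foldl (a_inner c (i:Int)) (midM c n i mm)
      = midM c n i n
  | 0, mm, hmk => by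
      rw [PySem.List.pyRange_one_eq_nil (by omega), List.foldl_nil, show mm = n from by omega]
  | k+1, mm, hmk => by
      rw [PySem.List.pyRange_one_cons (by exact_mod_cast (by omega : mm < n)), List.foldl_cons]
      rw [a_step c n i mm (by omega)]
      rw [show ((mm:Int)+1) = ((mm+1:Nat):Int) by push_cast; ring]
      exact inner_go c n i k (mm+1) (by omega)

-- ---------- A's outer loop ----------

theorem midM_zero (c : List Int) (n i : Nat) :
    midM c n i 0 = List.replicate (i+1) (zrow n) ++ rowsTail c (n:Int) ((i:Int)+1) := by
  unfold midM
  rw [padRow_zero, List.replicate_succ', List.append_assoc]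
  rfl

theorem midM_full (c : List Int) (n i : Nat) (hi : i < n) :
    midM c n i n = List.replicate i (zrow n) ++ rowsTail c (n:Int) (i:Int) := by
  unfold midM
  rw [padRow_full, rowsTail_cons c (n:Int) (i:Int) (by exact_mod_cast hi)]

theorem outer_go (c : List Int) (n : Nat) :
    ∀ k : Nat, 1 ≤ k → k ≤ n →
    (PySem.List.pyRange ((k:Int)-1) 0 (-1)).foldl
      (fun gm i => (PySem.List.pyRange 0 (n:Int) 1).foldl (a_inner c i) gm)
      (List.replicate k (zrow n) ++ rowsTail c (n:Int) (k:Int))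
    = List.replicate 1 (zrow n) ++ rowsTail c (n:Int) 1
  | 0, h1, _ => absurd h1 (by omega)
  | 1, _, _ => by
      rw [show ((1:Nat):Int)-1 = (0:Int) by norm_num]
      rw [PySem.List.pyRange_neg_one_eq_nil (by omega), List.foldl_nil]
      norm_num
  | k+2, h1, hk => by
      rw [show ((k+2:Nat):Int)-1 = ((k:Int)+1) by push_cast; ring]
      rw [PySem.List.pyRange_neg_one_cons (by omega : (0:Int) < (k:Int)+1), List.foldl_cons]
      have hstart : List.replicate (k+2) (zrow n) ++ rowsTail c (n:Int) ((k+2:Nat):Int)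
          = midM c n (k+1) 0 := by
        rw [midM_zero c n (k+1), show ((k+2:Nat):Int) = ((k+1:Nat):Int)+1 from by push_cast; ring]
      have hcast : ((k:Int)+1) = ((k+1:Nat):Int) := by push_cast; ring
      rw [hcast, hstart]
      have hin := inner_go c n (k+1) n 0 (by omega)
      simp only [Nat.cast_zero] at hin
      rw [hin, midM_full c n (k+1) (by omega)]
      exact outer_go c n (k+1) (by omega) (by omega)

-- ---------- putting A together ----------

theorem a_eq (coins_list : List Int) :
    get_gains_matrix coins_list = rowsTail coins_list (coins_list.length:Int) 0 := by
  unfold get_gains_matrix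
  simp only [PySem.List.len_eq, Int.toNat_natCast]
  rcases Nat.eq_zero_or_pos coins_list.length with h0 | hpos
  · rw [PySem.List.pyRange_one_eq_nil (by omega), List.foldl_nil,
        PySem.List.pyRange_neg_one_eq_nil (by omega), List.foldl_nil,
        rowsTail_of_ge _ _ _ (by omega), h0]
    rfl
  · set n : Nat := coins_list.length with hn
    have hstart : List.replicate n (List.replicate n (0:Int)) =
        List.replicate n (zrow n) ++ rowsTail coins_list (n:Int) (n:Int) := by
      rw [rowsTail_of_ge _ _ _ (le_refl _), List.append_nil]
      rfl
    rw [hstart, outer_go coins_list n n (by omega) (by omega)]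
    have hcg :
        List.foldl
          (fun gm j => setCell gm 0 j
            (max (cGet coins_list 0 + best_next_coin (0 + 1) j gm coins_list)
              (cGet coins_list j + best_next_coin 0 (j - 1) gm coins_list)))
          (List.replicate 1 (zrow n) ++ rowsTail coins_list (n:Int) 1)
          (PySem.List.pyRange 0 (n:Int) 1)
        = List.foldl (a_inner coins_list 0)
          (List.replicate 1 (zrow n) ++ rowsTail coins_list (n:Int) 1)
          (PySem.List.pyRange 0 (n:Int) 1) := by
      apply PySem.List.foldl_congr_mem
      intro gm j hj
      have hj0 : (0:Int) ≤ j := (PySem.List.mem_pyRange_one.mp hj).1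
      rw [a_inner, if_neg (by omega)]
    rw [hcg]
    have hmid0 : List.replicate 1 (zrow n) ++ rowsTail coins_list (n:Int) 1 =
        midM coins_list n 0 0 := by
      have := midM_zero coins_list n 0
      simp only [Nat.cast_zero, zero_add] at this
      rw [this]
    rw [hmid0]
    have hin := inner_go coins_list n 0 n 0 (by omega)
    simp only [Nat.cast_zero] at hin
    rw [hin]
    have := midM_full coins_list n 0 hpos
    simp only [Nat.cast_zero, List.replicate_zero, List.nil_append] at this
    rw [this]

-- ---------- B: memoization is correct ----------

def InvM (c : List Int) (memo : PySem.Dict (Int × Int) Int) : Prop :=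
  ∀ p v, memo.get? p = some v → v = Gg c p.1 p.2

theorem gain_opp_ok (c : List Int) : ∀ fuel : Nat,
    (∀ i j memo, 2 * (j - i).toNat + 1 ≤ fuel → InvM c memo →
      (gainB c i j memo).1 = Gg c i j ∧ InvM c (gainB c i j memo).2) ∧
    (∀ a b memo, 2 * (b - a + 1).toNat ≤ fuel → InvM c memo →
      (oppB c a b memo).1 = Go c a b ∧ InvM c (oppB c a b memo).2) := by
  intro fuel
  induction fuel using Nat.strong_induction_on with
  | _ fuel IH =>
    constructor
    · intro i j memo hf hInv
      by_cases hij : i > j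
      · rw [gainB, dif_pos hij, Gg_of_gt c hij]
        exact ⟨rfl, hInv⟩
      · rw [gainB, dif_neg hij]
        cases hg : memo.get? (i, j) with
        | some v =>
            exact ⟨hInv (i, j) v hg, hInv⟩
        | none =>
            have h1 := (IH (2 * (j - i).toNat) (by omega)).2 (i+1) j memo (by omega) hInv
            have h2 := (IH (2 * (j - i).toNat) (by omega)).2 i (j-1)
              (oppB c (i+1) j memo).2 (by omega) h1.2
            simp only []
            have hbest : max (cGet c i + (oppB c (i+1) j memo).1)
                (cGet c j + (oppB c i (j-1) (oppB c (i+1) j memo).2).1) = Gg c i j := by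
              rw [h1.1, h2.1, Gg_of_le c hij]
            refine ⟨hbest, ?_⟩
            intro p v hp
            rw [PySem.Dict.get?_insert] at hp
            by_cases hpe : p = (i, j)
            · rw [if_pos hpe] at hp
              cases hp
              rw [hbest, hpe]
            · rw [if_neg hpe] at hp
              exact h2.2 p v hp
    · intro a b memo hf hInv
      by_cases hab : a + 1 > b
      · rw [oppB, dif_pos hab, Go_of_gt c hab]
        exact ⟨rfl, hInv⟩
      · rw [oppB, dif_neg hab, Go_of_le c hab]
        by_cases hc : cGet c a ≥ cGet c b
        · rw [if_pos hc, if_pos hc]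
          exact (IH (2 * (b - a - 1).toNat + 1) (by omega)).1 (a+1) b memo (by omega) hInv
        · rw [if_neg hc, if_neg hc]
          exact (IH (2 * (b - a - 1).toNat + 1) (by omega)).1 a (b-1) memo (by omega) hInv

theorem gainB_ok (c : List Int) (i j : Int) (memo : PySem.Dict (Int × Int) Int)
    (h : InvM c memo) :
    (gainB c i j memo).1 = Gg c i j ∧ InvM c (gainB c i j memo).2 :=
  (gain_opp_ok c (2 * (j - i).toNat + 1)).1 i j memo (le_refl _) h

-- ---------- B: the two folds ----------

theorem rowB_go (c : List Int) (i : Int) :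
    ∀ (js : List Int) (acc : List Int) (memo), InvM c memo →
    (js.foldl (fun st j => let p := gainB c i j st.2; (st.1 ++ [p.1], p.2)) (acc, memo)).1
      = acc ++ js.map (fun j => Gg c i j) ∧
    InvM c ((js.foldl (fun st j => let p := gainB c i j st.2; (st.1 ++ [p.1], p.2)) (acc, memo)).2)
  | [], acc, memo, h => by simp; exact h
  | j :: js, acc, memo, h => by
      rw [List.foldl_cons]
      have hg := gainB_ok c i j memo h
      have ih := rowB_go c i js (acc ++ [(gainB c i j memo).1]) (gainB c i j memo).2 hg.2
      simp only [] at ih ⊢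
      refine ⟨?_, ih.2⟩
      rw [ih.1, hg.1]
      simp

theorem rowB_eq (c : List Int) (n i : Int) (memo : PySem.Dict (Int × Int) Int)
    (h : InvM c memo) :
    (rowB c n i memo).1 = rowG c n i ∧ InvM c (rowB c n i memo).2 := by
  unfold rowB rowG
  have := rowB_go c i (PySem.List.pyRange 0 n 1) [] memo h
  simpa using this

theorem outerB_go (c : List Int) (n : Int) :
    ∀ (is : List Int) (acc : List (List Int)) (memo), InvM c memo →
    (is.foldl (fun st i => let p := rowB c n i st.2; (st.1 ++ [p.1], p.2)) (acc, memo)).1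
      = acc ++ is.map (rowG c n)
  | [], acc, memo, h => by simp
  | i :: is, acc, memo, h => by
      rw [List.foldl_cons]
      have hr := rowB_eq c n i memo h
      have := outerB_go c n is (acc ++ [(rowB c n i memo).1]) (rowB c n i memo).2 hr.2
      simp only [] at this ⊢
      rw [this, hr.1]
      simp

theorem b_eq (coins_list : List Int) :
    get_gains_matrix_alt coins_list = rowsTail coins_list (coins_list.length:Int) 0 := by
  unfold get_gains_matrix_alt
  simp only [PySem.List.len_eq]
  have hInv : InvM coins_list (PySem.Dict.mk [] : PySem.Dict (Int × Int) Int) := by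
    intro p v hp
    cases hp
  rw [outerB_go coins_list (coins_list.length:Int)
      (PySem.List.pyRange ((coins_list.length:Int) - 1) (-1) (-1)) [] _ hInv]
  rw [show PySem.List.pyRange ((coins_list.length:Int) - 1) (-1) (-1)
        = (PySem.List.pyRange 0 (coins_list.length:Int) 1).reverse from by
    have := PySem.List.pyRange_neg_one_eq_reverse ((coins_list.length:Int) - 1) (-1)
    simpa using this]
  rw [List.map_reverse, List.nil_append, List.reverse_reverse]
  rfl

-- ===== VERDICT (by name: the statement is the Claim_ definition above) =====
theorem get_gains_matrix_spec : Claim_equal_get_gains_matrix := by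
  intro coins_list _
  unfold Spec_get_gains_matrix
  rw [a_eq, b_eq]
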